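-- pv_equiv track=rewrite | github.com/ejfn/advent-of-code | 2024/14/day14.py | count_quadrants
-- ===== SOURCE A (Python) =====
-- def count_quadrants(positions, width, height):
--     """Count robots in each quadrant, excluding middle lines."""
--     mid_x = width // 2
--     mid_y = height // 2
--
--     quadrants = [0, 0, 0, 0]  # top-left, top-right, bottom-left, bottom-right
--
--     for x, y in positions:
--         # Skip robots exactly in the middle
--         if x == mid_x or y == mid_y:
--             continue
--
--         # Determine quadrant
--         if x < mid_x and y < mid_y:
--             quadrants[0] += 1  # top-left
--         elif x > mid_x and y < mid_y:
--             quadrants[1] += 1  # top-right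
--         elif x < mid_x and y > mid_y:
--             quadrants[2] += 1  # bottom-left
--         else:  # x > mid_x and y > mid_y
--             quadrants[3] += 1  # bottom-right
--
--     return quadrants
-- ===== SOURCE B (Python) =====
-- def count_quadrants(positions, width, height):
--     """Count robots in each quadrant, excluding middle lines."""
--     mid_x = width // 2
--     mid_y = height // 2
--     return [
--         sum(1 for x, y in positions if x < mid_x and y < mid_y),
--         sum(1 for x, y in positions if x > mid_x and y < mid_y),
--         sum(1 for x, y in positions if x < mid_x and y > mid_y),
--         sum(1 for x, y in positions if x > mid_x and y > mid_y),
--     ]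
-- ===== Notes on version B (the rewrite author's own statement) =====
-- stated objective: alternative
-- what changed: Replaces A's single branching loop over a mutable 4-element list with four independent counting passes, one per quadrant, using strict inequalities so midline robots need no explicit skip.
import Mathlib
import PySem

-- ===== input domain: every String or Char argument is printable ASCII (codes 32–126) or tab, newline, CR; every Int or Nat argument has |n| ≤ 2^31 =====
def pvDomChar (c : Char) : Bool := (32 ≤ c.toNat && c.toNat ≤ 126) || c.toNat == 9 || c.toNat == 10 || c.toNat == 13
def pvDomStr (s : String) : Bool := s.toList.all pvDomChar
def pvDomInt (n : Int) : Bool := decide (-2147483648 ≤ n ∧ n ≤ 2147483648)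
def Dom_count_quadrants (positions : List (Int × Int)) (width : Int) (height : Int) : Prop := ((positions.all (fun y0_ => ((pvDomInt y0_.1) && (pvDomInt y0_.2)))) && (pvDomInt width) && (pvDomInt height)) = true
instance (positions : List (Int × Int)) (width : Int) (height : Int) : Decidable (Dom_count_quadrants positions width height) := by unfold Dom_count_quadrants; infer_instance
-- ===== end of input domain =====

-- B replaces A's single branching loop over a mutable 4-element list with four
-- independent counting passes (one per quadrant, strict inequalities); objective: alternative.

-- ===== PORT A =====
-- A's loop body: skip midline robots, else increment one of four counters (ported as a 4-tuple of Ints).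
-- cqStep is A's loop body verbatim: the same if/elif chain, over the counter tuple.
def cqStep (mid_x mid_y : Int) (q : Int × Int × Int × Int) (p : Int × Int) : Int × Int × Int × Int :=
  let x := p.1
  let y := p.2
  if x = mid_x ∨ y = mid_y then q
  else if x < mid_x ∧ y < mid_y then (q.1 + 1, q.2.1, q.2.2.1, q.2.2.2)
  else if x > mid_x ∧ y < mid_y then (q.1, q.2.1 + 1, q.2.2.1, q.2.2.2)
  else if x < mid_x ∧ y > mid_y then (q.1, q.2.1, q.2.2.1 + 1, q.2.2.2)
  else (q.1, q.2.1, q.2.2.1, q.2.2.2 + 1)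

def count_quadrants (positions : List (Int × Int)) (width : Int) (height : Int) : List Int :=
  let mid_x := PySem.Int.floordiv width 2
  let mid_y := PySem.Int.floordiv height 2
  let q := positions.foldl (cqStep mid_x mid_y) ((0 : Int), (0 : Int), (0 : Int), (0 : Int))
  [q.1, q.2.1, q.2.2.1, q.2.2.2]

-- ===== PORT B =====
def count_quadrants_alt (positions : List (Int × Int)) (width : Int) (height : Int) : List Int :=
  let mid_x := PySem.Int.floordiv width 2
  let mid_y := PySem.Int.floordiv height 2
  [ (positions.countP (fun p => p.1 < mid_x && p.2 < mid_y) : Int),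
    (positions.countP (fun p => p.1 > mid_x && p.2 < mid_y) : Int),
    (positions.countP (fun p => p.1 < mid_x && p.2 > mid_y) : Int),
    (positions.countP (fun p => p.1 > mid_x && p.2 > mid_y) : Int) ]

-- ===== PRECONDITION & SPEC =====
def Spec_count_quadrants (positions : List (Int × Int)) (width : Int) (height : Int) (out : List Int) : Prop := out = count_quadrants_alt positions width height
instance (positions : List (Int × Int)) (width : Int) (height : Int) (out : List Int) : Decidable (Spec_count_quadrants positions width height out) := by unfold Spec_count_quadrants; infer_instance

-- ===== CLAIM (what is proved, stated in full; the proofs are below) =====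
def Claim_equal_count_quadrants : Prop := ∀ (positions : List (Int × Int)) (width : Int) (height : Int), Dom_count_quadrants positions width height → Spec_count_quadrants positions width height (count_quadrants positions width height)

-- ===== LEMMAS AND PROOFS =====

-- cqStep adds the four quadrant indicators of p to the counter tuple.
theorem cqStep_eq (mx my : Int) (q : Int × Int × Int × Int) (p : Int × Int) :
    cqStep mx my q p =
      (q.1 + (if p.1 < mx ∧ p.2 < my then 1 else 0),
       q.2.1 + (if p.1 > mx ∧ p.2 < my then 1 else 0),
       q.2.2.1 + (if p.1 < mx ∧ p.2 > my then 1 else 0),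
       q.2.2.2 + (if p.1 > mx ∧ p.2 > my then 1 else 0)) := by
  obtain ⟨x, y⟩ := p
  obtain ⟨q1, q2, q3, q4⟩ := q
  unfold cqStep
  dsimp only
  split_ifs <;> simp only [Prod.mk.injEq, true_and, and_true] <;> omega

-- Loop invariant: A's fold from an arbitrary accumulator adds B's four quadrant counts componentwise.
theorem cq_fold_eq (mx my : Int) (l : List (Int × Int)) :
    ∀ q : Int × Int × Int × Int,
      (l.foldl (cqStep mx my) q) =
      (q.1 + (l.countP (fun p => p.1 < mx && p.2 < my) : Int),
       q.2.1 + (l.countP (fun p => p.1 > mx && p.2 < my) : Int),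
       q.2.2.1 + (l.countP (fun p => p.1 < mx && p.2 > my) : Int),
       q.2.2.2 + (l.countP (fun p => p.1 > mx && p.2 > my) : Int)) := by
  induction l with
  | nil => intro q; simp
  | cons a t ih =>
    intro q
    simp only [List.foldl_cons, ih, cqStep_eq, List.countP_cons, Bool.and_eq_true,
      decide_eq_true_eq, Prod.mk.injEq]
    refine ⟨?_, ?_, ?_, ?_⟩ <;> split_ifs <;> push_cast <;> omega

theorem count_quadrants_eq (positions : List (Int × Int)) (width height : Int) :
    count_quadrants positions width height = count_quadrants_alt positions width height := by
  unfold count_quadrants count_quadrants_alt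
  simp only [cq_fold_eq]
  norm_num

-- ===== VERDICT (by name: the statement is the Claim_ definition above) =====
theorem count_quadrants_spec : Claim_equal_count_quadrants := by
  intro positions width height _
  unfold Spec_count_quadrants
  exact count_quadrants_eq positions width height
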